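-- pv_equiv track=rewrite | github.com/addinkevin/programmingchallenges | InterviewPreparationKit/DynamicProgramming/decibinary.py | getTargetCount
-- ===== SOURCE A (Python) =====
-- def getTargetCount(countMatrix, digits, target):
--     if digits == 0 and target == 0:
--         return 1
--     elif digits == 0 and target != 0:
--         return 0
--     elif target < 0:
--         return 0
--     elif countMatrix[digits][target] != -1:
--         return countMatrix[digits][target]
--
--     count = 0
--     for i in range(10):
--         count += getTargetCount(countMatrix, digits - 1,
--                                 target - i * (1 << (digits - 1)))
--
--     countMatrix[digits][target] = count
--     return count
-- ===== SOURCE B (Python) =====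
-- def levelCount(countMatrix, d, t):
--     if d == 0:
--         return 1 if t == 0 else 0
--     if t < 0:
--         return 0
--     return countMatrix[d][t]
--
--
-- def getTargetCount(countMatrix, digits, target):
--     # Fill the memo table bottom-up instead of recursing top-down: for each digit
--     # level compute every still-unfilled count (-1) from the level below.
--     if digits == 0:
--         return 1 if target == 0 else 0
--     if target < 0:
--         return 0
--     for d in range(1, digits + 1):
--         weight = 1 << (d - 1)
--         for t in range(target + 1):
--             if countMatrix[d][t] == -1:
--                 countMatrix[d][t] = sum(levelCount(countMatrix, d - 1, t - i * weight)
--                                         for i in range(10))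
--     return countMatrix[digits][target]
-- ===== Notes on version B (the rewrite author's own statement) =====
-- stated objective: alternative
-- what changed: Replaces A's top-down memoized recursion with an iterative bottom-up fill of the memo table (each digit level computed from the level below, already-filled cells kept); Pre_ restricts to the natural domain where countMatrix is a table covering levels 0..digits and sums 0..target with digits >= 0 -- on smaller tables or negative digits A raises or returns via accidental partial indexing / negative-index wraparound; equivalence is about the return value only (both mutate countMatrix, ending in different fill states).
-- outside the precondition, e.g. on getTargetCount([[], [-1], [5, 9]], 2, 1): A returns 9, B raises IndexError; on getTargetCount([[5], [7]], -1, 0): A returns 7, B returns 7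
import Mathlib
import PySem

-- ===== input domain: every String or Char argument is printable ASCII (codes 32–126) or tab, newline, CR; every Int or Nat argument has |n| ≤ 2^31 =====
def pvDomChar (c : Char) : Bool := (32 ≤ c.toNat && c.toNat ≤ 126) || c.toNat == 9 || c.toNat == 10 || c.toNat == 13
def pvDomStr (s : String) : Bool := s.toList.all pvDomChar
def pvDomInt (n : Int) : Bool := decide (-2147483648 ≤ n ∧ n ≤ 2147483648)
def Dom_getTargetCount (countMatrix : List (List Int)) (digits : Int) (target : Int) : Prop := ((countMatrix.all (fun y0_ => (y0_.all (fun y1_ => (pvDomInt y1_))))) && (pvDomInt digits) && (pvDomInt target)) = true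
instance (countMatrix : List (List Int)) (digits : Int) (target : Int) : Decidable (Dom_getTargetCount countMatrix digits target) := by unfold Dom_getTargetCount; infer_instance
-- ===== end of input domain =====

-- B replaces A's top-down memoized recursion by an iterative bottom-up fill of the memo table
-- (each digit level computed from the level below; already-filled cells kept). Both Pythons
-- mutate countMatrix and leave it in different fill states: the equivalence proved here is
-- about the RETURN value only.

-- ===== PORT A =====
-- countMatrix[d][t] read; on Pre_ inputs the indices are nonnegative and in range, so getD is exact
def pvCell (M : List (List Int)) (d : Nat) (t : Int) : Int := (M.getD d []).getD t.toNat 0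
-- countMatrix[d][t] = v; on Pre_ inputs the indices are nonnegative and in range, so set is exact
def pvSetCell (M : List (List Int)) (d : Nat) (t : Int) (v : Int) : List (List Int) :=
  M.modify d (fun row => row.set t.toNat v)

-- A's recursion on `digits`, threading the mutated countMatrix through the i-loop
def getTargetCountGo (M : List (List Int)) (d : Nat) (t : Int) : Int × List (List Int) :=
  match d with
  | 0 => (if t = 0 then 1 else 0, M)          -- digits == 0: 1 if target == 0 else 0
  | d + 1 =>
    if t < 0 then (0, M)
    else
      let cached := pvCell M (d + 1) t
      if cached ≠ -1 then (cached, M)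
      else
        let r := (List.range 10).foldl
          (fun acc (i : Nat) =>
            let s := getTargetCountGo acc.2 d (t - (i : Int) * 2 ^ d)
            (acc.1 + s.1, s.2)) (0, M)
        (r.1, pvSetCell r.2 (d + 1) t r.1)
termination_by d

-- totality guard only: for digits < 0 with target ≥ 0 Python A raises (ValueError/IndexError)
-- or returns a cell found by negative-index wraparound; all of that is outside Pre_getTargetCount
def getTargetCount (countMatrix : List (List Int)) (digits : Int) (target : Int) : Int :=
  if digits < 0 then 0 else (getTargetCountGo countMatrix digits.toNat target).1

-- ===== PORT B =====
-- Source B's levelCount: value of a cell of level d, with the digits==0 / negative-sum base cases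
def altLevel (M : List (List Int)) (d : Nat) (t : Int) : Int :=
  if d = 0 then (if t = 0 then 1 else 0)
  else if t < 0 then 0
  else pvCell M d t

-- Source B's bottom-up fill: for d in 1..digits, for t in 0..target, fill cell (d,t) if it is -1,
-- then read cell (digits,target); the fold threads the mutated matrix
def getTargetCount_alt (countMatrix : List (List Int)) (digits : Int) (target : Int) : Int :=
  if digits = 0 then (if target = 0 then 1 else 0)
  else if target < 0 then 0
  else
    let Mf := (List.range digits.toNat).foldl (fun M (dm1 : Nat) =>
      (List.range (target.toNat + 1)).foldl (fun M (tn : Nat) =>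
        if pvCell M (dm1 + 1) (tn : Int) = -1 then
          pvSetCell M (dm1 + 1) (tn : Int)
            ((List.range 10).foldl
              (fun s (i : Nat) => s + altLevel M dm1 ((tn : Int) - (i : Int) * 2 ^ dm1)) 0)
        else M) M) countMatrix
    pvCell Mf digits.toNat target

-- ===== PRECONDITION & SPEC =====
-- Natural domain: countMatrix is a memo table covering levels 0..digits and sums 0..target (the
-- shape the caller allocates) with digits ≥ 0; on smaller tables or negative digits A raises
-- IndexError/ValueError or returns a value found by accidental negative-index wraparound or by
-- which cells its recursion happens to touch — accidents of representation B does not reproduce.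
def Pre_getTargetCount (countMatrix : List (List Int)) (digits : Int) (target : Int) : Prop :=
  target < 0 ∨ (0 ≤ digits ∧ (digits = 0 ∨
    (digits < (countMatrix.length : Int) ∧
      ∀ row ∈ (countMatrix.take (digits.toNat + 1)).drop 1, target < (row.length : Int))))
instance (countMatrix : List (List Int)) (digits : Int) (target : Int) : Decidable (Pre_getTargetCount countMatrix digits target) := by unfold Pre_getTargetCount; infer_instance
def pvWitness_getTargetCount : List (List Int) × Int × Int := ([[-1, -1], [-1, -1]], 1, 1)

def Spec_getTargetCount (countMatrix : List (List Int)) (digits : Int) (target : Int) (out : Int) : Prop := out = getTargetCount_alt countMatrix digits target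
instance (countMatrix : List (List Int)) (digits : Int) (target : Int) (out : Int) : Decidable (Spec_getTargetCount countMatrix digits target out) := by unfold Spec_getTargetCount; infer_instance

-- ===== CLAIM (what is proved, stated in full; the proofs are below) =====
def Claim_equal_getTargetCount : Prop := ∀ (countMatrix : List (List Int)) (digits : Int) (target : Int), Dom_getTargetCount countMatrix digits target → Pre_getTargetCount countMatrix digits target → Spec_getTargetCount countMatrix digits target (getTargetCount countMatrix digits target)

-- ===== LEMMAS AND PROOFS =====

-- the pure value of A's recursion over the ORIGINAL matrix (no mutation)
def pvF (M : List (List Int)) (d : Nat) (t : Int) : Int :=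
  match d with
  | 0 => if t = 0 then 1 else 0
  | d + 1 =>
    if t < 0 then 0
    else
      let c := pvCell M (d + 1) t
      if c ≠ -1 then c
      else (List.range 10).foldl (fun s (i : Nat) => s + pvF M d (t - (i : Int) * 2 ^ d)) 0
termination_by d

theorem pvF_neg (M : List (List Int)) (d : Nat) (t : Int) (h : t < 0) : pvF M d t = 0 := by
  cases d with
  | zero => simp [pvF]; omega
  | succ d => simp [pvF, h]

theorem pvCell_cast (M : List (List Int)) (d : Nat) (t : Int) :
    pvCell M d ((t.toNat : Int)) = pvCell M d t := by
  simp only [pvCell, Int.toNat_natCast]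

-- memoization invariant for A: every cell is the original one, or the original was -1 and it
-- has been filled with the pure value
def pvInv (M0 M : List (List Int)) : Prop :=
  ∀ (d tn : Nat), pvCell M d (tn : Int) = pvCell M0 d (tn : Int) ∨
    (pvCell M0 d (tn : Int) = -1 ∧ pvCell M d (tn : Int) = pvF M0 d (tn : Int))

theorem pvInv_refl (M0 : List (List Int)) : pvInv M0 M0 := fun _ _ => Or.inl rfl

theorem pvCell_setCell (M : List (List Int)) (d : Nat) (t : Int) (v : Int) (d' tn : Nat) :
    pvCell (pvSetCell M d t v) d' (tn : Int) = pvCell M d' (tn : Int) ∨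
    (d' = d ∧ tn = t.toNat ∧ pvCell (pvSetCell M d t v) d' (tn : Int) = v) := by
  simp only [pvCell, pvSetCell, List.getD_eq_getElem?_getD, List.getElem?_modify,
    Int.toNat_natCast]
  by_cases hd : d = d'
  · subst hd
    rcases h : M[d]? with _ | row
    · simp
    · simp only [Option.map_eq_map, Option.map_some, if_true, Option.getD_some]
      rw [List.getElem?_set]
      by_cases htn : t.toNat = tn
      · by_cases hlen : t.toNat < row.length
        · exact Or.inr ⟨trivial, htn.symm, by rw [if_pos htn, if_pos hlen]; simp⟩
        · left
          rw [if_pos htn, if_neg hlen, List.getElem?_eq_none (show row.length ≤ tn by omega)]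
      · left; rw [if_neg htn]
  · left
    rcases h : M[d']? with _ | row <;> simp [hd]

theorem go_fold_aux (M0 : List (List Int)) (d : Nat) (t : Int)
    (IH : ∀ (M : List (List Int)) (t' : Int), pvInv M0 M →
      (getTargetCountGo M d t').1 = pvF M0 d t' ∧ pvInv M0 (getTargetCountGo M d t').2) :
    ∀ (l : List Nat) (c : Int) (M : List (List Int)), pvInv M0 M →
      (l.foldl (fun acc (i : Nat) =>
          let s := getTargetCountGo acc.2 d (t - (i : Int) * 2 ^ d)
          (acc.1 + s.1, s.2)) (c, M)).1
        = l.foldl (fun s (i : Nat) => s + pvF M0 d (t - (i : Int) * 2 ^ d)) c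
      ∧ pvInv M0 ((l.foldl (fun acc (i : Nat) =>
          let s := getTargetCountGo acc.2 d (t - (i : Int) * 2 ^ d)
          (acc.1 + s.1, s.2)) (c, M)).2) := by
  intro l
  induction l with
  | nil => intro c M hM; exact ⟨rfl, hM⟩
  | cons i l ih =>
    intro c M hM
    obtain ⟨h1, h2⟩ := IH M (t - (i : Int) * 2 ^ d) hM
    simpa [List.foldl_cons, h1] using ih (c + pvF M0 d (t - (i : Int) * 2 ^ d))
      (getTargetCountGo M d (t - (i : Int) * 2 ^ d)).2 h2

theorem go_eq_pvF (M0 : List (List Int)) :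
    ∀ (d : Nat) (M : List (List Int)) (t : Int), pvInv M0 M →
      (getTargetCountGo M d t).1 = pvF M0 d t ∧ pvInv M0 (getTargetCountGo M d t).2 := by
  intro d
  induction d with
  | zero =>
    intro M t hM
    refine ⟨?_, ?_⟩ <;> simp [getTargetCountGo, pvF, hM]
  | succ d ih =>
    intro M t hM
    by_cases ht : t < 0
    · simp [getTargetCountGo, pvF, ht, hM]
    · have hcast : pvCell M (d + 1) t = pvCell M (d + 1) ((t.toNat : Int)) := (pvCell_cast ..).symm
      have hcast0 : pvCell M0 (d + 1) t = pvCell M0 (d + 1) ((t.toNat : Int)) := (pvCell_cast ..).symm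
      have hFcast : pvF M0 (d + 1) ((t.toNat : Int)) = pvF M0 (d + 1) t := by
        rw [Int.toNat_of_nonneg (by omega)]
      by_cases hc : pvCell M (d + 1) t ≠ -1
      · -- cached value returned; the invariant says it is the pure value
        have hval : pvCell M (d + 1) t = pvF M0 (d + 1) t := by
          rcases hM (d + 1) t.toNat with h | ⟨h0, h⟩
          · -- untouched cell: pvF reads the same value
            rw [hcast, h, ← hcast0]
            have : pvCell M0 (d + 1) t ≠ -1 := by rw [hcast0, ← h, ← hcast]; exact hc
            simp [pvF, ht, this]
          · rw [hcast, h, hFcast]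
        simp only [getTargetCountGo, if_neg ht, if_pos hc]
        exact ⟨hval, hM⟩
      · rw [not_not] at hc
        have h0 : pvCell M0 (d + 1) t = -1 := by
          rcases hM (d + 1) t.toNat with h | ⟨h0, _⟩
          · rw [hcast0, ← h, ← hcast, hc]
          · rw [hcast0, h0]
        have hF : pvF M0 (d + 1) t
            = (List.range 10).foldl (fun s (i : Nat) => s + pvF M0 d (t - (i : Int) * 2 ^ d)) 0 := by
          simp [pvF, ht, h0]
        obtain ⟨ha, hb⟩ := go_fold_aux M0 d t ih (List.range 10) 0 M hM
        simp only [getTargetCountGo, if_neg ht, if_neg (not_not_intro hc)]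
        refine ⟨by rw [ha, hF], ?_⟩
        -- the write stores the pure value into a cell whose original content was -1
        intro d' tn
        rcases pvCell_setCell ((List.range 10).foldl (fun acc (i : Nat) =>
            let s := getTargetCountGo acc.2 d (t - (i : Int) * 2 ^ d)
            (acc.1 + s.1, s.2)) (0, M)).2 (d + 1) t _ d' tn with h | ⟨hd', htn, hv⟩
        · rw [h]; exact hb d' tn
        · subst hd'; subst htn
          right
          refine ⟨by rw [← hcast0]; exact h0, ?_⟩
          rw [hv, ha, ← hF, hFcast]

-- ===== B side =====

def pvRowLen (M : List (List Int)) (d : Nat) : Nat := (M.getD d []).length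

theorem pvSetCell_length (M : List (List Int)) (d : Nat) (t v : Int) :
    (pvSetCell M d t v).length = M.length := by
  simp [pvSetCell]

theorem pvSetCell_rowLen (M : List (List Int)) (d : Nat) (t v : Int) (lvl : Nat) :
    pvRowLen (pvSetCell M d t v) lvl = pvRowLen M lvl := by
  simp only [pvRowLen, pvSetCell, List.getD_eq_getElem?_getD, List.getElem?_modify]
  by_cases h : d = lvl
  · subst h; cases hM : M[d]? <;> simp
  · simp [h]

theorem pvCell_setCell_self (M : List (List Int)) (d tn : Nat) (v : Int)
    (hd : d < M.length) (ht : tn < pvRowLen M d) :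
    pvCell (pvSetCell M d ((tn : Nat) : Int) v) d ((tn : Nat) : Int) = v := by
  have hM : M[d]? = some M[d] := List.getElem?_eq_getElem hd
  have ht' : tn < (M[d]).length := by
    simpa [pvRowLen, List.getD_eq_getElem?_getD, hM] using ht
  simp [pvCell, pvSetCell, List.getD_eq_getElem?_getD, hM, ht']

-- state invariant for B's outer fold: lengths preserved, cells above level k (or beyond target,
-- or at level 0) untouched, cells of levels 1..k at sums 0..T filled with the pure value
def pvInvB (M0 : List (List Int)) (T k : Nat) (M : List (List Int)) : Prop :=
  M.length = M0.length ∧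
  (∀ lvl, pvRowLen M lvl = pvRowLen M0 lvl) ∧
  (∀ d' tn : Nat, (d' = 0 ∨ k < d' ∨ T < tn) → pvCell M d' (tn : Int) = pvCell M0 d' (tn : Int)) ∧
  (∀ lvl, 1 ≤ lvl → lvl ≤ k → ∀ tn : Nat, tn ≤ T → pvCell M lvl (tn : Int) = pvF M0 lvl (tn : Int))

theorem altLevel_eq (M0 M : List (List Int)) (T k : Nat)
    (hfill : 1 ≤ k → ∀ tn : Nat, tn ≤ T → pvCell M k (tn : Int) = pvF M0 k (tn : Int))
    (t' : Int) (ht' : t' ≤ (T : Int)) :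
    altLevel M k t' = pvF M0 k t' := by
  match k with
  | 0 => simp [altLevel, pvF]
  | k + 1 =>
    by_cases h : t' < 0
    · rw [altLevel, if_neg (by omega), if_pos h, pvF_neg M0 (k + 1) t' h]
    · have hc : pvCell M (k + 1) t' = pvF M0 (k + 1) t' := by
        rw [← pvCell_cast M (k + 1) t',
          hfill (by omega) t'.toNat (by omega), Int.toNat_of_nonneg (by omega)]
      rw [altLevel, if_neg (by omega), if_neg h, hc]

theorem inner_fill (M0 : List (List Int)) (T k : Nat)
    (hk1 : k + 1 < M0.length) (hrow : T < pvRowLen M0 (k + 1))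
    (M : List (List Int)) (hM : pvInvB M0 T k M) :
    ∀ n, n ≤ T + 1 →
      ((List.range n).foldl (fun M (tn : Nat) =>
        if pvCell M (k + 1) (tn : Int) = -1 then
          pvSetCell M (k + 1) (tn : Int)
            ((List.range 10).foldl
              (fun s (i : Nat) => s + altLevel M k ((tn : Int) - (i : Int) * 2 ^ k)) 0)
        else M) M).length = M0.length ∧
      (∀ lvl, pvRowLen ((List.range n).foldl (fun M (tn : Nat) =>
        if pvCell M (k + 1) (tn : Int) = -1 then
          pvSetCell M (k + 1) (tn : Int)
            ((List.range 10).foldl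
              (fun s (i : Nat) => s + altLevel M k ((tn : Int) - (i : Int) * 2 ^ k)) 0)
        else M) M) lvl = pvRowLen M0 lvl) ∧
      (∀ d' tn : Nat, (d' ≠ k + 1 ∨ n ≤ tn) →
        pvCell ((List.range n).foldl (fun M (tn : Nat) =>
          if pvCell M (k + 1) (tn : Int) = -1 then
            pvSetCell M (k + 1) (tn : Int)
              ((List.range 10).foldl
                (fun s (i : Nat) => s + altLevel M k ((tn : Int) - (i : Int) * 2 ^ k)) 0)
          else M) M) d' (tn : Int) = pvCell M d' (tn : Int)) ∧
      (∀ tn : Nat, tn < n →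
        pvCell ((List.range n).foldl (fun M (tn : Nat) =>
          if pvCell M (k + 1) (tn : Int) = -1 then
            pvSetCell M (k + 1) (tn : Int)
              ((List.range 10).foldl
                (fun s (i : Nat) => s + altLevel M k ((tn : Int) - (i : Int) * 2 ^ k)) 0)
          else M) M) (k + 1) (tn : Int) = pvF M0 (k + 1) (tn : Int)) := by
  intro n
  induction n with
  | zero => exact fun _ => ⟨hM.1, hM.2.1, fun _ _ _ => rfl, fun _ h => absurd h (by omega)⟩
  | succ n ih =>
    intro hn
    obtain ⟨ihlen, ihrow, ihold, ihnew⟩ := ih (by omega)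
    rw [show List.range (n + 1) = List.range n ++ [n] from List.range_succ,
      List.foldl_append, List.foldl_cons, List.foldl_nil]
    set Mn := (List.range n).foldl (fun M (tn : Nat) =>
      if pvCell M (k + 1) (tn : Int) = -1 then
        pvSetCell M (k + 1) (tn : Int)
          ((List.range 10).foldl
            (fun s (i : Nat) => s + altLevel M k ((tn : Int) - (i : Int) * 2 ^ k)) 0)
      else M) M with hMn
    -- the cell examined at step n is still the original one
    have hcur : pvCell Mn (k + 1) (n : Int) = pvCell M0 (k + 1) (n : Int) := by
      rw [ihold (k + 1) n (Or.inr (le_refl n))]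
      exact hM.2.2.1 (k + 1) n (Or.inr (Or.inl (by omega)))
    have hfillk : 1 ≤ k → ∀ tn : Nat, tn ≤ T → pvCell Mn k (tn : Int) = pvF M0 k (tn : Int) := by
      intro h1 tn htn
      rw [ihold k tn (Or.inl (by omega))]
      exact hM.2.2.2 k h1 (le_refl k) tn htn
    by_cases hc : pvCell Mn (k + 1) (n : Int) = -1
    · rw [if_pos hc]
      have hv : (List.range 10).foldl
          (fun s (i : Nat) => s + altLevel Mn k ((n : Int) - (i : Int) * 2 ^ k)) 0
          = pvF M0 (k + 1) (n : Int) := by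
        have h0 : pvCell M0 (k + 1) (n : Int) = -1 := by rw [← hcur]; exact hc
        have hstep : (fun (s : Int) (i : Nat) => s + altLevel Mn k ((n : Int) - (i : Int) * 2 ^ k))
            = fun (s : Int) (i : Nat) => s + pvF M0 k ((n : Int) - (i : Int) * 2 ^ k) := by
          funext s i
          have hpos : (0:Int) ≤ (i : Int) * 2 ^ k := by positivity
          rw [altLevel_eq M0 Mn T k hfillk ((n : Int) - (i : Int) * 2 ^ k) (by omega)]
        rw [hstep]
        have hnn : ¬ ((n : Int) < 0) := by omega
        simp [pvF, hnn, h0]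
      constructor
      · rw [pvSetCell_length, ihlen]
      refine ⟨fun lvl => by rw [pvSetCell_rowLen, ihrow], ?_, ?_⟩
      · intro d' tn hcond
        rcases pvCell_setCell Mn (k + 1) (n : Int) _ d' tn with h | ⟨hd', htn, _⟩
        · rw [h]
          refine ihold d' tn ?_
          rcases hcond with h' | h'
          · exact Or.inl h'
          · exact Or.inr (by omega)
        · exfalso
          rcases hcond with h | h
          · exact h hd'
          · omega
      · intro tn htn
        by_cases he : tn = n
        · subst he
          rw [hv.symm]
          exact pvCell_setCell_self Mn (k + 1) tn _ (by omega) (by rw [ihrow]; omega)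
        · rcases pvCell_setCell Mn (k + 1) (n : Int) _ (k + 1) tn with h | ⟨_, htn', _⟩
          · rw [h]; exact ihnew tn (by omega)
          · exfalso; simp at htn'; omega
    · rw [if_neg hc]
      refine ⟨ihlen, ihrow, ?_, ?_⟩
      · intro d' tn hcond
        refine ihold d' tn ?_
        rcases hcond with h' | h'
        · exact Or.inl h'
        · exact Or.inr (by omega)
      · intro tn htn
        by_cases he : tn = n
        · subst he
          -- cached cell: pvF reads the same original value
          have h0 : pvCell M0 (k + 1) (tn : Int) ≠ -1 := by rw [← hcur]; exact hc
          have hnn : ¬ ((tn : Int) < 0) := by omega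
          rw [hcur]
          simp [pvF, hnn, h0]
        · exact ihnew tn (by omega)

theorem outer_fill (M0 : List (List Int)) (T D : Nat)
    (hD : D < M0.length) (hrows : ∀ lvl, 1 ≤ lvl → lvl ≤ D → T < pvRowLen M0 lvl) :
    ∀ k, k ≤ D → pvInvB M0 T k
      ((List.range k).foldl (fun M (dm1 : Nat) =>
        (List.range (T + 1)).foldl (fun M (tn : Nat) =>
          if pvCell M (dm1 + 1) (tn : Int) = -1 then
            pvSetCell M (dm1 + 1) (tn : Int)
              ((List.range 10).foldl
                (fun s (i : Nat) => s + altLevel M dm1 ((tn : Int) - (i : Int) * 2 ^ dm1)) 0)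
          else M) M) M0) := by
  intro k
  induction k with
  | zero =>
    exact fun _ => ⟨rfl, fun _ => rfl, fun _ _ _ => rfl, fun _ h1 h2 _ _ => absurd h1 (by omega)⟩
  | succ k ih =>
    intro hk
    have hMk := ih (by omega)
    rw [show List.range (k + 1) = List.range k ++ [k] from List.range_succ,
      List.foldl_append, List.foldl_cons, List.foldl_nil]
    obtain ⟨hlen, hrow, hold, hnew⟩ := inner_fill M0 T k (by omega)
      (hrows (k + 1) (by omega) (by omega)) _ hMk (T + 1) (le_refl _)
    refine ⟨hlen, hrow, ?_, ?_⟩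
    · intro d' tn hcond
      have hne : d' ≠ k + 1 ∨ T + 1 ≤ tn := by
        rcases hcond with h | h | h
        · exact Or.inl (by omega)
        · exact Or.inl (by omega)
        · exact Or.inr (by omega)
      rw [hold d' tn hne]
      refine hMk.2.2.1 d' tn ?_
      rcases hcond with h | h | h
      · exact Or.inl h
      · exact Or.inr (Or.inl (by omega))
      · exact Or.inr (Or.inr h)
    · intro lvl h1 h2 tn htn
      by_cases he : lvl = k + 1
      · subst he; exact hnew tn (by omega)
      · rw [hold lvl tn (Or.inl he)]
        exact hMk.2.2.2 lvl h1 (by omega) tn htn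

-- Pre_'s row clause, in the per-level form the B-side proof consumes
theorem pre_rows (M : List (List Int)) (digits target : Int)
    (hd0 : 0 < digits) (hlen : digits < (M.length : Int))
    (h : ∀ row ∈ (M.take (digits.toNat + 1)).drop 1, target < (row.length : Int)) :
    ∀ lvl, 1 ≤ lvl → lvl ≤ digits.toNat → target < (pvRowLen M lvl : Int) := by
  intro lvl h1 h2
  have hlt : lvl < M.length := by omega
  have hmem : M.getD lvl [] ∈ (M.take (digits.toNat + 1)).drop 1 := by
    have : ((M.take (digits.toNat + 1)).drop 1)[lvl - 1]? = some (M.getD lvl []) := by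
      rw [List.getElem?_drop, List.getElem?_take]
      have he : 1 + (lvl - 1) = lvl := by omega
      rw [he, if_pos (by omega), List.getElem?_eq_getElem hlt,
        List.getD_eq_getElem?_getD, List.getElem?_eq_getElem hlt]
      rfl
    exact List.mem_of_getElem? this
  exact h _ hmem

theorem getTargetCount_spec : Claim_equal_getTargetCount := by
  intro M digits target _ hpre
  show getTargetCount M digits target = getTargetCount_alt M digits target
  unfold getTargetCount getTargetCount_alt
  by_cases h0 : digits = 0
  · subst h0; simp [getTargetCountGo]
  · rw [if_neg h0]
    by_cases ht : target < 0
    · rw [if_pos ht]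
      by_cases hneg : digits < 0
      · rw [if_pos hneg]
      · rw [if_neg hneg]
        have hn : digits.toNat = (digits.toNat - 1) + 1 := by omega
        rw [hn]
        simp [getTargetCountGo, ht]
    · have hpre' : 0 < digits ∧ digits < (M.length : Int) ∧
          ∀ row ∈ (M.take (digits.toNat + 1)).drop 1, target < (row.length : Int) := by
        rcases hpre with h | ⟨h1, h2 | ⟨h3, h4⟩⟩
        · omega
        · omega
        · exact ⟨by omega, h3, h4⟩
      obtain ⟨hd0, hlen, hrowsmem⟩ := hpre'
      rw [if_neg (show ¬ digits < 0 by omega), if_neg ht]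
      have hA := (go_eq_pvF M digits.toNat M target (pvInv_refl M)).1
      have hrows : ∀ lvl, 1 ≤ lvl → lvl ≤ digits.toNat → target.toNat < pvRowLen M lvl := by
        intro lvl h1 h2
        have := pre_rows M digits target hd0 hlen hrowsmem lvl h1 h2
        omega
      have hfin := (outer_fill M target.toNat digits.toNat (by omega) hrows digits.toNat
        (le_refl _)).2.2.2 digits.toNat (by omega) (le_refl _) target.toNat (le_refl _)
      have hcast : ((target.toNat : Nat) : Int) = target := Int.toNat_of_nonneg (by omega)
      rw [hA]
      conv_lhs => rw [← hcast]
      conv_rhs => rw [← pvCell_cast]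
      exact hfin.symm
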